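-- pv_equiv track=rewrite | github.com/ecks/rc | rc/net_rt/rt_dup.py | prefix_length
-- ===== SOURCE A (Python) =====
-- def prefix_length(mask_lsd):
--   mask_lsd_bin = bin(mask_lsd)
--   i = 0
--   prefix_len = 0
--   end_of_str = False
--   start_counting = False
--   while(not end_of_str):
--     if(mask_lsd_bin[i] == 'b'):
--       start_counting = True
--     if(start_counting and mask_lsd_bin[i] == '1'):
--       prefix_len = prefix_len + 1
--     if(start_counting and (mask_lsd_bin[i] == '0' or i+1 == len(mask_lsd_bin))):
--       end_of_str = True
--     i = i + 1
--   return prefix_len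
-- ===== SOURCE B (Python) =====
-- def prefix_length(mask_lsd):
--     n = abs(mask_lsd)
--     L = n.bit_length()
--     return L - (n ^ ((1 << L) - 1)).bit_length()
-- ===== Notes on version B (the rewrite author's own statement) =====
-- stated objective: simpler
-- what changed: Replaced the character-by-character scan of the bin() string (flag-driven while loop with manual indexing) by a closed-form bit computation: with n = abs(mask_lsd) and L = n.bit_length(), the answer is L - (n ^ ((1 << L) - 1)).bit_length().
import Mathlib
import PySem

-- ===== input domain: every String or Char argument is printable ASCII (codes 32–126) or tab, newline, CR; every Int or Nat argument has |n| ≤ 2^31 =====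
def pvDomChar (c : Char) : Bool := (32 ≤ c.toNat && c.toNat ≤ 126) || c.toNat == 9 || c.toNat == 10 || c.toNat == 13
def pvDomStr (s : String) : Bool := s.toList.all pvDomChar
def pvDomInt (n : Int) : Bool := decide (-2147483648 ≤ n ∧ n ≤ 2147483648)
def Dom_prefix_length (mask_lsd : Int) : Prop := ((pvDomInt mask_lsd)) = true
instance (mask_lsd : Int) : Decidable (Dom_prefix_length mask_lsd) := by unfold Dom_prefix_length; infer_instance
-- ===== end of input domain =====

-- B replaces A's character scan of bin()'s string by a closed-form bit computation (simpler).

-- ===== PORT A =====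
-- Python's bin(): binary digits of |n|, most significant first ('' for 0; the caller adds '0' for 0)
def pvBinDigits : Nat → List Char
  | 0 => []
  | n+1 => pvBinDigits ((n+1)/2) ++ [if (n+1) % 2 == 1 then '1' else '0']
decreasing_by exact Nat.div_lt_self (Nat.succ_pos n) one_lt_two

-- bin(m) as a list of characters: optional '-', then "0b", then the digits of |m| ("0" for 0)
def pvBinChars (m : Int) : List Char :=
  (if m < 0 then ['-'] else []) ++ '0' :: 'b' ::
    (if m.natAbs = 0 then ['0'] else pvBinDigits m.natAbs)

-- the while loop of A: state = remaining characters / start_counting / prefix_len;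
-- end_of_str and the index i are represented by recursing on the remaining character list
-- (i+1 == len(s) ⟺ the tail is empty).  A's loop always ends at a '0' or at the last
-- character, so the [] case is never reached on a bin() string.
def pvLoopA : List Char → Bool → Int → Int
  | [], _, acc => acc
  | c :: rest, sc, acc =>
      let sc' := if c == 'b' then true else sc
      let acc' := if sc' && c == '1' then acc + 1 else acc
      if sc' && (c == '0' || rest.isEmpty) then acc' else pvLoopA rest sc' acc'

def prefix_length (mask_lsd : Int) : Int :=
  pvLoopA (pvBinChars mask_lsd) false 0

-- ===== PORT B =====
-- Python int.bit_length() on a nonnegative value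
def pvBitLen : Nat → Nat
  | 0 => 0
  | n+1 => pvBitLen ((n+1)/2) + 1
decreasing_by exact Nat.div_lt_self (Nat.succ_pos n) one_lt_two

def prefix_length_alt (mask_lsd : Int) : Int :=
  let n := mask_lsd.natAbs
  let L := pvBitLen n
  (L : Int) - (pvBitLen (n ^^^ (2 ^ L - 1)) : Int)

-- ===== PRECONDITION & SPEC =====
def Spec_prefix_length (mask_lsd : Int) (out : Int) : Prop := out = prefix_length_alt mask_lsd
instance (mask_lsd : Int) (out : Int) : Decidable (Spec_prefix_length mask_lsd out) := by unfold Spec_prefix_length; infer_instance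

-- ===== CLAIM (what is proved, stated in full; the proofs are below) =====
def Claim_equal_prefix_length : Prop := ∀ (mask_lsd : Int), Dom_prefix_length mask_lsd → Spec_prefix_length mask_lsd (prefix_length mask_lsd)

-- ===== LEMMAS AND PROOFS =====

-- number of leading '1' characters in the digit string of n
def pvLead (n : Nat) : Nat := ((pvBinDigits n).takeWhile (· == '1')).length

lemma pvBinDigits_mem (n : Nat) : ∀ c ∈ pvBinDigits n, c = '0' ∨ c = '1' := by
  induction n using Nat.strong_induction_on with
  | _ n ih =>
    match n with
    | 0 => simp [pvBinDigits]
    | n+1 =>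
      rw [pvBinDigits]
      intro c hc
      rcases List.mem_append.mp hc with h | h
      · exact ih ((n+1)/2) (Nat.div_lt_self (Nat.succ_pos n) one_lt_two) c h
      · simp at h; split at h <;> simp [h]

lemma pvBinDigits_ne_nil (n : Nat) (hn : n ≠ 0) : pvBinDigits n ≠ [] := by
  match n, hn with
  | n+1, _ => rw [pvBinDigits]; simp

lemma pvBinDigits_length (n : Nat) : (pvBinDigits n).length = pvBitLen n := by
  induction n using Nat.strong_induction_on with
  | _ n ih =>
    match n with
    | 0 => simp [pvBinDigits, pvBitLen]
    | n+1 =>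
      rw [pvBinDigits, pvBitLen, List.length_append,
        ih ((n+1)/2) (Nat.div_lt_self (Nat.succ_pos n) one_lt_two)]
      simp

-- the loop, once counting, counts the leading '1' characters of the remaining digit string
lemma pvLoopA_counting (ds : List Char) (hne : ds ≠ [])
    (hd : ∀ c ∈ ds, c = '0' ∨ c = '1') (acc : Int) :
    pvLoopA ds true acc = acc + (ds.takeWhile (· == '1')).length := by
  induction ds generalizing acc with
  | nil => exact absurd rfl hne
  | cons c rest ih =>
    rcases hd c List.mem_cons_self with h0 | h1
    · subst h0; simp [pvLoopA, List.takeWhile]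
    · subst h1
      cases rest with
      | nil => simp [pvLoopA, List.takeWhile]
      | cons d tl =>
        have htw : List.takeWhile (fun x => x == '1') ('1' :: d :: tl)
            = '1' :: List.takeWhile (fun x => x == '1') (d :: tl) := by
          simp [List.takeWhile_cons]
        have hrec := ih (by simp) (fun c hc => hd c (List.mem_cons_of_mem _ hc)) (acc + 1)
        rw [pvLoopA]
        simp only [beq_self_eq_true, List.isEmpty_cons, Bool.or_false]
        simp [hrec, htw]
        omega

-- the xor of two numbers split into (2·quotient + bit)
lemma pvXorSplit (a b x y : Nat) (hx : x < 2) (hy : y < 2) :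
    (2*a+x) ^^^ (2*b+y) = 2*(a ^^^ b) + (x ^^^ y) := by
  apply Nat.eq_of_testBit_eq
  intro i
  cases i with
  | zero =>
      rw [Nat.testBit_xor, Nat.testBit_zero, Nat.testBit_zero, Nat.testBit_zero]
      interval_cases x <;> interval_cases y <;> simp
  | succ i =>
      rw [Nat.testBit_xor, Nat.testBit_succ, Nat.testBit_succ, Nat.testBit_succ]
      have h1 : (2*a+x)/2 = a := by omega
      have h2 : (2*b+y)/2 = b := by omega
      have h3 : (2*(a^^^b)+(x^^^y))/2 = a^^^b := by
        have : x ^^^ y < 2 := by interval_cases x <;> interval_cases y <;> decide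
        omega
      rw [h1, h2, h3, Nat.testBit_xor]

lemma pvBitLen_two_mul_add (q e : Nat) (hq : q ≠ 0) (he : e < 2) :
    pvBitLen (2*q + e) = pvBitLen q + 1 := by
  obtain ⟨k, hk⟩ : ∃ k, 2*q + e = k + 1 := ⟨2*q + e - 1, by omega⟩
  rw [hk, pvBitLen]
  have h2 : (k+1)/2 = q := by omega
  rw [h2]

lemma pvBitLen_pos (c : Nat) (hc : c ≠ 0) : pvBitLen c ≠ 0 := by
  obtain ⟨k, rfl⟩ : ∃ k, c = k + 1 := ⟨c - 1, by omega⟩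
  rw [pvBitLen]; omega

-- core identity: leading ones of the digit string + bit_length of the complement = bit_length
lemma pvLead_key (n : Nat) :
    pvLead n + pvBitLen (n ^^^ (2 ^ pvBitLen n - 1)) = pvBitLen n := by
  induction n using Nat.strong_induction_on with
  | _ n ih =>
    match n with
    | 0 => simp [pvLead, pvBinDigits, pvBitLen]
    | 1 => norm_num [pvLead, pvBinDigits, pvBitLen, List.takeWhile]
    | n+2 =>
      have hq1 : (n+2)/2 ≠ 0 := by omega
      have hblt : (n+2) % 2 < 2 := by omega
      have hdec : n+2 = 2*((n+2)/2) + (n+2) % 2 := by omega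
      have hLq := pvBinDigits_length ((n+2)/2)
      have hL : pvBitLen (n+2) = pvBitLen ((n+2)/2) + 1 := by
        conv_lhs => rw [hdec]
        exact pvBitLen_two_mul_add _ _ hq1 hblt
      have hpow : 2 ^ pvBitLen (n+2) - 1 = 2 * (2 ^ pvBitLen ((n+2)/2) - 1) + 1 := by
        rw [hL, pow_succ]
        have : 1 ≤ 2 ^ pvBitLen ((n+2)/2) := Nat.one_le_two_pow
        omega
      have hxor : (n+2) ^^^ (2 ^ pvBitLen (n+2) - 1)
          = 2 * (((n+2)/2) ^^^ (2 ^ pvBitLen ((n+2)/2) - 1)) + ((n+2) % 2 ^^^ 1) :=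
        calc (n+2) ^^^ (2 ^ pvBitLen (n+2) - 1)
            = (2*((n+2)/2) + (n+2) % 2) ^^^ (2*(2 ^ pvBitLen ((n+2)/2) - 1) + 1) := by
              rw [← hdec, ← hpow]
          _ = _ := pvXorSplit _ _ _ 1 hblt one_lt_two
      have hih := ih ((n+2)/2) (by omega)
      have hdig : pvBinDigits (n+2)
          = pvBinDigits ((n+2)/2) ++ [if (n+2) % 2 == 1 then '1' else '0'] := by
        rw [pvBinDigits]
      have hlead : pvLead (n+2) =
          if (List.takeWhile (· == '1') (pvBinDigits ((n+2)/2))).length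
              = (pvBinDigits ((n+2)/2)).length
          then (pvBinDigits ((n+2)/2)).length
            + (List.takeWhile (· == '1') [if (n+2) % 2 == 1 then '1' else '0']).length
          else pvLead ((n+2)/2) := by
        rw [pvLead, hdig, List.takeWhile_append]
        by_cases h : (List.takeWhile (· == '1') (pvBinDigits ((n+2)/2))).length
            = (pvBinDigits ((n+2)/2)).length
        · rw [if_pos h, if_pos h, List.length_append]
        · rw [if_neg h, if_neg h]; rfl
      by_cases hall : ((n+2)/2) ^^^ (2 ^ pvBitLen ((n+2)/2) - 1) = 0
      · -- the upper digits are all ones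
        have hleadq : pvLead ((n+2)/2) = pvBitLen ((n+2)/2) := by
          rw [hall] at hih; simpa [pvBitLen] using hih
        have hfull : (List.takeWhile (· == '1') (pvBinDigits ((n+2)/2))).length
            = (pvBinDigits ((n+2)/2)).length := by
          rw [hLq]; exact hleadq
        have hB0 : pvBitLen 0 = 0 := by rw [pvBitLen]
        have hB1 : pvBitLen 1 = 1 := by
          rw [show (1:Nat) = 0 + 1 from rfl, pvBitLen, hB0]
        rw [hlead, if_pos hfull, hxor, hall, hLq, hL, Nat.mul_zero, Nat.zero_add]
        have hb01 : (n+2) % 2 = 0 ∨ (n+2) % 2 = 1 := by omega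
        rcases hb01 with hb | hb <;> rw [hb] <;>
          simp [List.takeWhile, hB0, hB1]
      · -- somewhere below the top there is a zero digit
        have hcb := pvBitLen_pos _ hall
        have hnotfull : (List.takeWhile (· == '1') (pvBinDigits ((n+2)/2))).length
            ≠ (pvBinDigits ((n+2)/2)).length := by
          rw [hLq]; intro h
          have : pvLead ((n+2)/2) = pvBitLen ((n+2)/2) := h
          omega
        have he : (n+2) % 2 ^^^ 1 < 2 := by
          have hb01 : (n+2) % 2 = 0 ∨ (n+2) % 2 = 1 := by omega
          rcases hb01 with hb | hb <;> rw [hb] <;> decide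
        rw [hlead, if_neg hnotfull, hxor, pvBitLen_two_mul_add _ _ hall he, hL]
        omega

-- ===== VERDICT (by name: the statement is the Claim_ definition above) =====
theorem prefix_length_spec : Claim_equal_prefix_length := by
  intro m _
  unfold Spec_prefix_length prefix_length pvBinChars
  by_cases h0 : m.natAbs = 0
  · have hm : m = 0 := by omega
    subst hm
    simp [pvLoopA, prefix_length_alt, pvBitLen]
  · rw [if_neg h0]
    have hne := pvBinDigits_ne_nil m.natAbs h0
    have hne' : (pvBinDigits m.natAbs).isEmpty = false := by
      simpa [List.isEmpty_iff] using hne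
    have hcount := pvLoopA_counting (pvBinDigits m.natAbs) hne (pvBinDigits_mem m.natAbs) 0
    have hstep : pvLoopA ('0' :: 'b' :: pvBinDigits m.natAbs) false 0
        = pvLoopA (pvBinDigits m.natAbs) true 0 := by
      rw [pvLoopA, pvLoopA]
      simp [hne']
    have hfin : pvLoopA ((if m < 0 then ['-'] else []) ++ '0' :: 'b' :: pvBinDigits m.natAbs)
          false 0 = pvLoopA ('0' :: 'b' :: pvBinDigits m.natAbs) false 0 := by
      split
      · rw [List.cons_append, pvLoopA]; simp
      · simp
    rw [hfin, hstep, hcount]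
    have hl : (List.takeWhile (fun x => x == '1') (pvBinDigits m.natAbs)).length
        = pvLead m.natAbs := rfl
    rw [hl]
    have key := pvLead_key m.natAbs
    dsimp only [prefix_length_alt]
    omega
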